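-- pv_equiv track=rewrite | github.com/xterler159/codewars | who_likes_it.py | who_likes
-- ===== SOURCE A (Python) =====
-- def who_likes(ppl_who_liked_array):
--     msg = ""
--     size_arr = len(ppl_who_liked_array)
--
--     if size_arr == 0:
--         msg = "No one likes this"
--         return msg
--
--     if size_arr >= 1:
--         if size_arr == 1:
--             msg = f"{ppl_who_liked_array[0]} likes this"
--             return msg
--
--         if size_arr == 2:
--             msg = f"{ppl_who_liked_array[0]} and {ppl_who_liked_array[1]} like this"
--             return msg
--
--         if size_arr == 3:
--             # using enumerate to get the index too
--             for index, people in enumerate(ppl_who_liked_array):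
--                 if index == 2:
--                     msg += " and "
--
--                 msg += f"{people}"
--
--                 if index == 0 and index <= 1:
--                     msg += ", "
--
--             msg += " like this"
--             return msg
--
--         if size_arr >= 4:
--             first_two_ppl = ppl_who_liked_array[:2]
--             rest_ppl = len(ppl_who_liked_array[2:])
--
--             for index, people in enumerate(first_two_ppl):
--                 msg += f"{people}"
--
--                 if index == 0 and index <= 1:
--                     msg += ", "
--
--             return msg + f" and {rest_ppl} others like this"
-- ===== SOURCE B (Python) =====
-- TEMPLATES = [
--     "No one likes this",
--     "{} likes this",
--     "{} and {} like this",
--     "{}, {} and {} like this",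
--     "{}, {} and {} others like this",
-- ]
--
--
-- def who_likes(ppl_who_liked_array):
--     n = len(ppl_who_liked_array)
--     if n <= 3:
--         args = ppl_who_liked_array[:3]
--     else:
--         args = ppl_who_liked_array[:2] + [str(n - 2)]
--     return TEMPLATES[min(n, 4)].format(*args)
-- ===== Notes on version B (the rewrite author's own statement) =====
-- stated objective: idiomatic
-- what changed: Replaces the if-cascade with enumerate-driven string-building loops by a five-entry format-template table indexed by min(len, 4), filling it with the first names (or the first two plus the count of others).
import Mathlib
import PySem

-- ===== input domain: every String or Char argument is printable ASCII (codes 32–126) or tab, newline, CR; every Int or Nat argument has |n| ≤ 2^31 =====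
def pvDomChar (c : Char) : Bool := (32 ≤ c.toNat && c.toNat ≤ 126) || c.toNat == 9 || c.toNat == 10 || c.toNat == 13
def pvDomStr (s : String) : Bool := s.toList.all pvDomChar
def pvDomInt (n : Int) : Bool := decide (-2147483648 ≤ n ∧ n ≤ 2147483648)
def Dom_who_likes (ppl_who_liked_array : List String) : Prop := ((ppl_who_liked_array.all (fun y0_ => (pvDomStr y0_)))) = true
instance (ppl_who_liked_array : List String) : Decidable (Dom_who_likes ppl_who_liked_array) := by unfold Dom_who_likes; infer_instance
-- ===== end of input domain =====

-- B replaces A's if-cascade with enumerate-driven string-building loops by a lookup table of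
-- five format templates indexed by min(len, 4); idiomatic, same cost.

-- ===== PORT A =====
def who_likes (ppl_who_liked_array : List String) : String :=
  let size_arr : Int := ppl_who_liked_array.length
  if size_arr == 0 then "No one likes this"
  else
    -- Python's `if size_arr >= 1:` always holds here (size_arr == 0 returned above)
    if size_arr == 1 then
      (PySem.List.pyGetD ppl_who_liked_array 0 "") ++ " likes this"
    else if size_arr == 2 then
      (PySem.List.pyGetD ppl_who_liked_array 0 "") ++ " and " ++
        (PySem.List.pyGetD ppl_who_liked_array 1 "") ++ " like this"
    else if size_arr == 3 then
      let msg := (PySem.List.enumerate ppl_who_liked_array 0).foldl (fun msg p =>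
        let msg := if p.1 == 2 then msg ++ " and " else msg
        let msg := msg ++ p.2
        if p.1 == 0 && p.1 ≤ 1 then msg ++ ", " else msg) ""
      msg ++ " like this"
    else
      let first_two_ppl := PySem.List.slice ppl_who_liked_array none (some 2)
      let rest_ppl : Int := (PySem.List.slice ppl_who_liked_array (some 2) none).length
      let msg := (PySem.List.enumerate first_two_ppl 0).foldl (fun msg p =>
        let msg := msg ++ p.2
        if p.1 == 0 && p.1 ≤ 1 then msg ++ ", " else msg) ""
      msg ++ " and " ++ PySem.Int.toStr rest_ppl ++ " others like this"

-- ===== PORT B =====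
def pvTemplates : List String :=
  [ "No one likes this",
    "{} likes this",
    "{} and {} like this",
    "{}, {} and {} like this",
    "{}, {} and {} others like this" ]

-- str.format(*args): each "{}" in the template is replaced by the next argument
-- (exact for templates containing only plain "{}" fields, which is all Source B uses)
def pvFormat : List Char → List String → List Char
  | [], _ => []
  | c :: rest, as =>
    match c, rest, as with
    | '{', '}' :: rest', a :: as' => a.toList ++ pvFormat rest' as'
    | c, rest, as => c :: pvFormat rest as

def who_likes_alt (ppl_who_liked_array : List String) : String :=
  let n : Int := ppl_who_liked_array.length
  let args := if n ≤ 3 then PySem.List.slice ppl_who_liked_array none (some 3)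
              else PySem.List.slice ppl_who_liked_array none (some 2) ++ [PySem.Int.toStr (n - 2)]
  String.ofList (pvFormat (PySem.List.pyGetD pvTemplates (min n 4) "").toList args)

-- ===== PRECONDITION & SPEC =====
def Spec_who_likes (ppl_who_liked_array : List String) (out : String) : Prop := out = who_likes_alt ppl_who_liked_array
instance (ppl_who_liked_array : List String) (out : String) : Decidable (Spec_who_likes ppl_who_liked_array out) := by unfold Spec_who_likes; infer_instance

-- ===== CLAIM (what is proved, stated in full; the proofs are below) =====
def Claim_equal_who_likes : Prop := ∀ (ppl_who_liked_array : List String), Dom_who_likes ppl_who_liked_array → Spec_who_likes ppl_who_liked_array (who_likes ppl_who_liked_array)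

-- ===== LEMMAS AND PROOFS =====

theorem pvCase0 : who_likes [] = who_likes_alt [] := by decide

theorem pvCase1 (a : String) : who_likes [a] = who_likes_alt [a] := by
  apply String.toList_inj.mp
  have hA : who_likes [a] = a ++ " likes this" := rfl
  have hB : who_likes_alt [a] = String.ofList (pvFormat ("{} likes this".toList) [a]) := rfl
  rw [hA, hB, String.toList_ofList, String.toList_append,
      show ("{} likes this" : String).toList
        = ['{','}',' ','l','i','k','e','s',' ','t','h','i','s'] from rfl]
  simp [pvFormat]

theorem pvCase2 (a b : String) : who_likes [a, b] = who_likes_alt [a, b] := by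
  apply String.toList_inj.mp
  have hA : who_likes [a, b] = a ++ " and " ++ b ++ " like this" := rfl
  have hB : who_likes_alt [a, b] = String.ofList (pvFormat ("{} and {} like this".toList) [a, b]) := rfl
  rw [hA, hB, String.toList_ofList,
      show ("{} and {} like this" : String).toList
        = ['{','}',' ','a','n','d',' ','{','}',' ','l','i','k','e',' ','t','h','i','s'] from rfl]
  simp [pvFormat, String.toList_append]

theorem pvCase3 (a b c : String) : who_likes [a, b, c] = who_likes_alt [a, b, c] := by
  apply String.toList_inj.mp
  have hA : who_likes [a, b, c] = "" ++ a ++ ", " ++ b ++ " and " ++ c ++ " like this" := rfl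
  have hB : who_likes_alt [a, b, c]
      = String.ofList (pvFormat ("{}, {} and {} like this".toList) [a, b, c]) := rfl
  rw [hA, hB, String.toList_ofList,
      show ("{}, {} and {} like this" : String).toList
        = ['{','}',',',' ','{','}',' ','a','n','d',' ','{','}',' ','l','i','k','e',' ','t','h','i','s'] from rfl]
  simp [pvFormat, String.toList_append]

theorem pvCase4 (a b c d : String) (rest : List String) :
    who_likes (a :: b :: c :: d :: rest) = who_likes_alt (a :: b :: c :: d :: rest) := by
  have h4 : ((rest.length + 1 + 1 + 1 + 1 : Nat) : Int) = (rest.length : Int) + 4 := by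
    push_cast; ring
  have c0 : (((rest.length : Int) + 4) == 0) = false := by rw [beq_eq_false_iff_ne]; omega
  have c1 : (((rest.length : Int) + 4) == 1) = false := by rw [beq_eq_false_iff_ne]; omega
  have c2 : (((rest.length : Int) + 4) == 2) = false := by rw [beq_eq_false_iff_ne]; omega
  have c3 : (((rest.length : Int) + 4) == 3) = false := by rw [beq_eq_false_iff_ne]; omega
  have hne : ¬((rest.length : Int) + 4 ≤ 3) := by omega
  apply String.toList_inj.mp
  simp only [who_likes, who_likes_alt, List.length_cons, h4, c0, c1, c2, c3,
    Bool.false_eq_true, if_false, if_neg hne,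
    show min ((rest.length : Int) + 4) 4 = 4 from by omega]
  rw [show PySem.List.slice (a::b::c::d::rest) none (some 2) = [a,b] from by simp [pysem],
      show PySem.List.slice (a::b::c::d::rest) (some 2) none = c::d::rest from by simp [pysem],
      show (((c::d::rest).length : Nat) : Int) = (rest.length : Int) + 4 - 2 from by
        push_cast [List.length_cons]; ring]
  rw [show PySem.List.enumerate [a, b] = [(0, a), (1, b)] from by
        simp [PySem.List.enumerate_cons, PySem.List.enumerate_nil]]
  rw [show (PySem.List.pyGetD pvTemplates 4 "").toList
        = ['{','}',',',' ','{','}',' ','a','n','d',' ','{','}',' ','o','t','h','e','r','s',' ','l','i','k','e',' ','t','h','i','s'] from rfl]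
  simp [List.foldl, pvFormat, String.toList_append, String.toList_ofList]

theorem who_likes_eq_alt : ∀ l : List String, who_likes l = who_likes_alt l
  | [] => pvCase0
  | [a] => pvCase1 a
  | [a, b] => pvCase2 a b
  | [a, b, c] => pvCase3 a b c
  | a :: b :: c :: d :: rest => pvCase4 a b c d rest

-- ===== VERDICT (by name: the statement is the Claim_ definition above) =====
theorem who_likes_spec : Claim_equal_who_likes := by
  intro l _
  exact who_likes_eq_alt l
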